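-- pv_equiv track=rewrite | github.com/ma-wolpers/kursplaner | kursplaner/infrastructure/repositories/plan_table_file_repository.py | _extract_table_blocks
-- ===== SOURCE A (Python) =====
-- def _extract_table_blocks(lines: list[str]) -> list[tuple[int, int]]:
--     blocks: list[tuple[int, int]] = []
--     start = None
--
--     for idx, line in enumerate(lines):
--         stripped = line.strip()
--         is_row = stripped.startswith("|") and "|" in stripped[1:]
--         if is_row:
--             if start is None:
--                 start = idx
--         else:
--             if start is not None:
--                 if idx - start >= 2:
--                     blocks.append((start, idx - 1))
--                 start = None
--
--     if start is not None and len(lines) - start >= 2: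
--         blocks.append((start, len(lines) - 1))
--
--     return blocks
-- ===== SOURCE B (Python) =====
-- def _extract_table_blocks(lines: list[str]) -> list[tuple[int, int]]:
--     def is_row(line: str) -> bool:
--         stripped = line.strip()
--         return stripped.startswith("|") and "|" in stripped[1:]
--
--     flags = [is_row(line) for line in lines]
--     blocks: list[tuple[int, int]] = []
--     i = 0
--     n = len(flags)
--     while i < n:
--         j = i + 1
--         while j < n and flags[j] == flags[i]:
--             j += 1
--         if flags[i] and j - i >= 2:
--             blocks.append((i, j - 1))
--         i = j
--     return blocks
-- ===== Notes on version B (the rewrite author's own statement) =====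
-- stated objective: simpler
-- what changed: Replaces A's stateful scan with a None start-sentinel and a separate trailing-block flush by a run-length decomposition: precompute the per-line is_row flags, then jump over each maximal run of equal flags at once, emitting a block when the run is of True flags and has length >= 2.
import Mathlib
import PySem

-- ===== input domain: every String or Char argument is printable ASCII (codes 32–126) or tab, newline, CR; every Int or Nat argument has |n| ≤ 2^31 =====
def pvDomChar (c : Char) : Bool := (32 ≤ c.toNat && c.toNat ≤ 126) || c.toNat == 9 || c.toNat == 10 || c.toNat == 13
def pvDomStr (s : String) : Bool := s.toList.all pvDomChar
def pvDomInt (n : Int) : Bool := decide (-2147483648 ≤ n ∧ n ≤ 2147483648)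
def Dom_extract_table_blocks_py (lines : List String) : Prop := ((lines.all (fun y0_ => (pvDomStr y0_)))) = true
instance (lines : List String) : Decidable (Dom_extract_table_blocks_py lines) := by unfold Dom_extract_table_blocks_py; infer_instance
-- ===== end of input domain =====

-- B replaces A's stateful scan (None start-sentinel + trailing flush) by a run-length
-- decomposition over precomputed is_row flags; objective: simpler.


-- ===== PORT A =====
-- A's loop body: state = (blocks, start); exact branch order of the Python
def pvStepA (acc : List (Int × Int) × Option Int) (p : Int × String) : List (Int × Int) × Option Int :=
  let stripped := PySem.Str.strip p.2
  let is_row := PySem.Str.startswith stripped "|" && PySem.Str.isIn "|" (PySem.Str.slice stripped (some 1) none)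
  if is_row then
    match acc.2 with
    | none => (acc.1, some p.1)
    | some _ => acc
  else
    match acc.2 with
    | some s => (if p.1 - s ≥ 2 then acc.1 ++ [(s, p.1 - 1)] else acc.1, none)
    | none => acc

def extract_table_blocks_py (lines : List String) : List (Int × Int) :=
  let st := (PySem.List.enumerate lines 0).foldl pvStepA ([], none)
  match st.2 with
  | some s => if (lines.length : Int) - s ≥ 2 then st.1 ++ [(s, (lines.length : Int) - 1)] else st.1
  | none => st.1

-- ===== PORT B =====
def pvIsRow (line : String) : Bool :=
  let stripped := PySem.Str.strip line
  PySem.Str.startswith stripped "|" && PySem.Str.isIn "|" (PySem.Str.slice stripped (some 1) none)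

-- B's outer while loop: consume the maximal run of flags equal to the head flag
def pvRuns : List Bool → Int → List (Int × Int)
  | [], _ => []
  | f :: rest, off =>
    let run := rest.takeWhile (fun x => x == f)
    let rest' := rest.dropWhile (fun x => x == f)
    let len : Int := 1 + run.length
    (if f && decide (2 ≤ len) then [(off, off + len - 1)] else []) ++ pvRuns rest' (off + len)
termination_by fs _ => fs.length
decreasing_by
  exact Nat.lt_succ_of_le (List.length_dropWhile_le _ _)

def extract_table_blocks_py_alt (lines : List String) : List (Int × Int) :=
  pvRuns (lines.map pvIsRow) 0

-- ===== PRECONDITION & SPEC =====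
def Spec_extract_table_blocks_py (lines : List String) (out : List (Int × Int)) : Prop := out = extract_table_blocks_py_alt lines
instance (lines : List String) (out : List (Int × Int)) : Decidable (Spec_extract_table_blocks_py lines out) := by unfold Spec_extract_table_blocks_py; infer_instance

-- ===== CLAIM (what is proved, stated in full; the proofs are below) =====
def Claim_equal_extract_table_blocks_py : Prop := ∀ (lines : List String), Dom_extract_table_blocks_py lines → Spec_extract_table_blocks_py lines (extract_table_blocks_py lines)

-- ===== LEMMAS AND PROOFS =====

-- recursive restatement of A's scan: current index, open-block start; flush at the end
def pvLoopSpec : List Bool → Int → Option Int → List (Int × Int)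
  | [], _, none => []
  | [], idx, some s => if idx - s ≥ 2 then [(s, idx - 1)] else []
  | f :: fs, idx, none => if f then pvLoopSpec fs (idx + 1) (some idx) else pvLoopSpec fs (idx + 1) none
  | f :: fs, idx, some s =>
    if f then pvLoopSpec fs (idx + 1) (some s)
    else (if idx - s ≥ 2 then [(s, idx - 1)] else []) ++ pvLoopSpec fs (idx + 1) none

def pvFlush (e : Int) (st : List (Int × Int) × Option Int) : List (Int × Int) :=
  match st.2 with
  | some s => if e - s ≥ 2 then st.1 ++ [(s, e - 1)] else st.1
  | none => st.1

-- A's step body, with the inlined is_row expression recognized as pvIsRow (definitional)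
lemma pvStepA_eq (acc : List (Int × Int) × Option Int) (p : Int × String) :
    pvStepA acc p =
      if pvIsRow p.2 then
        match acc.2 with
        | none => (acc.1, some p.1)
        | some _ => acc
      else
        match acc.2 with
        | some s => (if p.1 - s ≥ 2 then acc.1 ++ [(s, p.1 - 1)] else acc.1, none)
        | none => acc := rfl

lemma pvFold_eq_loopSpec (ls : List String) : ∀ (idx : Int) (blocks : List (Int × Int)) (start : Option Int),
    pvFlush (idx + ls.length) ((PySem.List.enumerate ls idx).foldl pvStepA (blocks, start))
      = blocks ++ pvLoopSpec (ls.map pvIsRow) idx start := by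
  induction ls with
  | nil =>
    intro idx blocks start
    cases start with
    | none => simp [PySem.List.enumerate, pvFlush, pvLoopSpec]
    | some s =>
      simp only [PySem.List.enumerate, List.length_nil, Nat.cast_zero, add_zero, List.foldl_nil,
        pvFlush, List.map_nil, pvLoopSpec]
      split_ifs <;> simp
  | cons l ls ih =>
    intro idx blocks start
    rw [PySem.List.enumerate_cons]
    have harith : idx + ((l :: ls).length : Int) = (idx + 1) + ls.length := by
      simp only [List.length_cons]; push_cast; ring
    rw [harith]
    simp only [List.foldl_cons]
    by_cases hrow : pvIsRow l = true
    · cases start with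
      | none =>
        have hstep : pvStepA (blocks, none) (idx, l) = (blocks, some idx) := by
          rw [pvStepA_eq]; simp [hrow]
        rw [hstep, ih, List.map_cons, pvLoopSpec, if_pos hrow]
      | some s =>
        have hstep : pvStepA (blocks, some s) (idx, l) = (blocks, some s) := by
          rw [pvStepA_eq]; simp [hrow]
        rw [hstep, ih, List.map_cons, pvLoopSpec, if_pos hrow]
    · cases start with
      | none =>
        have hstep : pvStepA (blocks, none) (idx, l) = (blocks, none) := by
          rw [pvStepA_eq]; simp [hrow]
        rw [hstep, ih, List.map_cons, pvLoopSpec, if_neg hrow]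
      | some s =>
        have hstep : pvStepA (blocks, some s) (idx, l)
            = (blocks ++ (if idx - s ≥ 2 then [(s, idx - 1)] else []), none) := by
          rw [pvStepA_eq]; simp only [hrow, if_false, Bool.false_eq_true]
          split_ifs <;> simp
        rw [hstep, ih, List.map_cons, pvLoopSpec, if_neg hrow, List.append_assoc]

-- A consuming a maximal run of True flags starting from an open block
lemma pvLoopSpec_run : ∀ (r : List Bool), (∀ x ∈ r, x = true) →
    ∀ (rest' : List Bool) (idx s : Int), (∀ b ∈ rest'.head?, b = false) →
    pvLoopSpec (r ++ rest') idx (some s)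
      = (if (idx + (r.length : Int)) - s ≥ 2 then [(s, idx + (r.length : Int) - 1)] else [])
        ++ pvLoopSpec rest' (idx + (r.length : Int)) none := by
  intro r
  induction r with
  | nil =>
    intro _ rest' idx s hhead
    cases rest' with
    | nil => simp only [List.nil_append, List.length_nil, Nat.cast_zero, add_zero, pvLoopSpec]
             split_ifs <;> simp
    | cons b fs =>
      have hb : b = false := hhead b (by simp)
      subst hb
      simp [pvLoopSpec]
  | cons a r ih =>
    intro hall rest' idx s hhead
    have ha : a = true := hall a (by simp)
    subst ha
    have hstep : pvLoopSpec (true :: (r ++ rest')) idx (some s)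
        = pvLoopSpec (r ++ rest') (idx + 1) (some s) := by
      rw [pvLoopSpec]; simp
    rw [List.cons_append, hstep, ih (fun x hx => hall x (by simp [hx])) rest' (idx + 1) s hhead]
    have h1 : (idx + 1) + (r.length : Int) = idx + ((r.length : Int) + 1) := by ring
    simp only [List.length_cons]
    push_cast
    rw [h1]

-- B skips a run of False flags exactly as A does, one flag at a time
lemma pvRuns_false (fs : List Bool) (idx : Int) :
    pvRuns (false :: fs) idx = pvRuns fs (idx + 1) := by
  cases fs with
  | nil => simp [pvRuns]
  | cons b fs2 =>
    cases b with
    | false =>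
      rw [pvRuns, pvRuns]
      simp only [List.takeWhile_cons, List.dropWhile_cons, beq_self_eq_true, if_true,
        Bool.false_and, Bool.false_eq_true, if_false, List.nil_append, List.length_cons]
      congr 1
      push_cast
      ring
    | true =>
      rw [pvRuns]
      simp only [List.takeWhile_cons, List.dropWhile_cons]
      norm_num

lemma pvLoopSpec_eq_runs : ∀ (n : Nat) (fs : List Bool), fs.length ≤ n → ∀ (idx : Int),
    pvLoopSpec fs idx none = pvRuns fs idx := by
  intro n
  induction n with
  | zero =>
    intro fs hfs idx
    have : fs = [] := List.eq_nil_of_length_eq_zero (Nat.le_zero.mp hfs)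
    subst this
    simp [pvLoopSpec, pvRuns]
  | succ n ih =>
    intro fs hfs idx
    cases fs with
    | nil => simp [pvLoopSpec, pvRuns]
    | cons f rest =>
      simp only [List.length_cons, Nat.succ_le_succ_iff] at hfs
      cases f with
      | false =>
        have hA : pvLoopSpec (false :: rest) idx none = pvLoopSpec rest (idx + 1) none := by
          simp [pvLoopSpec]
        rw [hA, ih rest hfs (idx + 1), pvRuns_false]
      | true =>
        have hA : pvLoopSpec (true :: rest) idx none = pvLoopSpec rest (idx + 1) (some idx) := by
          simp [pvLoopSpec]
        have hsplit : rest = rest.takeWhile (fun x => x == true) ++ rest.dropWhile (fun x => x == true) :=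
          (List.takeWhile_append_dropWhile ..).symm
        have hall : ∀ x ∈ rest.takeWhile (fun x => x == true), x = true := by
          intro x hx
          simpa using List.mem_takeWhile_imp hx
        have hhead : ∀ b ∈ (rest.dropWhile (fun x => x == true)).head?, b = false := by
          intro b hb
          have h := List.head?_dropWhile_not (fun x => x == true) rest
          rw [hb] at h
          simpa using h
        have hlen : (rest.dropWhile (fun x => x == true)).length ≤ n :=
          le_trans (List.length_dropWhile_le _ _) hfs
        rw [hA]
        conv_lhs => rw [hsplit]
        rw [pvLoopSpec_run _ hall _ (idx + 1) idx hhead,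
            ih _ hlen ((idx + 1) + (rest.takeWhile (fun x => x == true)).length)]
        rw [pvRuns]
        have harith : (idx + 1) + ((rest.takeWhile (fun x => x == true)).length : Int)
            = idx + (1 + (rest.takeWhile (fun x => x == true)).length) := by ring
        rw [harith]
        congr 1
        simp only [Bool.true_and]
        split_ifs with h1 h2 h3
        · rfl
        · simp only [decide_eq_true_eq] at h2; omega
        · simp only [decide_eq_true_eq] at h3; omega
        · rfl

-- ===== VERDICT (by name: the statement is the Claim_ definition above) =====
theorem extract_table_blocks_py_spec : Claim_equal_extract_table_blocks_py := by
  intro lines _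
  unfold Spec_extract_table_blocks_py extract_table_blocks_py extract_table_blocks_py_alt
  have h := pvFold_eq_loopSpec lines 0 [] none
  simp only [zero_add] at h
  have h2 := pvLoopSpec_eq_runs (lines.map pvIsRow).length (lines.map pvIsRow) le_rfl 0
  calc _ = pvFlush (lines.length : Int) ((PySem.List.enumerate lines 0).foldl pvStepA ([], none)) := rfl
    _ = [] ++ pvLoopSpec (lines.map pvIsRow) 0 none := h
    _ = pvRuns (lines.map pvIsRow) 0 := by rw [List.nil_append, h2]
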